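-- pv_equiv track=rewrite | github.com/hoodyioreth/pdf_to_markdown_tools | archive/LKG/convert_to_md_v2.0.8.py | segment_paragraphs
-- ===== SOURCE A (Python) =====
-- def segment_paragraphs(lines):
--     paragraphs = []
--     para = []
--     for line in lines:
--         if line.strip() == "":
--             if para:
--                 paragraphs.append(" ".join(para).strip())
--                 para = []
--         else:
--             para.append(line.strip())
--     if para:
--         paragraphs.append(" ".join(para).strip())
--     return paragraphs
-- ===== SOURCE B (Python) =====
-- def segment_paragraphs(lines):
--     result = []
--     rest = lines
--     while rest:
--         head, tail = rest[0], rest[1:]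
--         if head.strip() == "":
--             rest = tail
--         else:
--             i = 0
--             while i < len(tail) and tail[i].strip() != "":
--                 i += 1
--             run = [head] + tail[:i]
--             result.append(" ".join(x.strip() for x in run).strip())
--             rest = tail[i:]
--     return result
-- ===== Notes on version B (the rewrite author's own statement) =====
-- stated objective: alternative
-- what changed: Replaces A's paragraph-accumulator fold with its duplicated trailing flush by a run-splitting scan: B repeatedly skips blank lines and slices off the next maximal non-blank run, joining each run in one step, so end-of-input needs no special flush.
import Mathlib
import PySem

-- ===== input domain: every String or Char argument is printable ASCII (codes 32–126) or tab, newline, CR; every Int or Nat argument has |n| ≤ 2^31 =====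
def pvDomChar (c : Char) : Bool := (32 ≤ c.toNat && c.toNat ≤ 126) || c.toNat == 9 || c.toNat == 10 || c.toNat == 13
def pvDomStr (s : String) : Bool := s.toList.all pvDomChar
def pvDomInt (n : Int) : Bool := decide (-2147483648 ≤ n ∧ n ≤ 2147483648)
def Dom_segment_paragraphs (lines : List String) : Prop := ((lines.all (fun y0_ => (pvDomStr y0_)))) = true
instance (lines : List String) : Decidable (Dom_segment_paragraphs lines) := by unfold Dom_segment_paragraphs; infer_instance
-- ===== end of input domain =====

-- B replaces A's paragraph-accumulator loop (with its duplicated trailing flush) by a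
-- run-splitting scan: skip blanks, slice off each maximal non-blank run and join it in one
-- step — an alternative decomposition of the same O(n) task, proved to return the same list.

-- shared tiny helper: " ".join(xs).strip()
def pvJoinStrip (xs : List String) : String := PySem.Str.strip (PySem.Str.join " " xs)

-- ===== PORT A =====
-- loop body of A: blank line flushes the pending paragraph, non-blank appends its strip
def segStep (st : List String × List String) (line : String) : List String × List String :=
  if PySem.Str.strip line == "" then
    if st.2.isEmpty then st else (st.1 ++ [pvJoinStrip st.2], [])
  else (st.1, st.2 ++ [PySem.Str.strip line])

-- A's trailing 'if para:' flush after the loop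
def segFinish (st : List String × List String) : List String :=
  if st.2.isEmpty then st.1 else st.1 ++ [pvJoinStrip st.2]

def segment_paragraphs (lines : List String) : List String :=
  segFinish (lines.foldl segStep ([], []))

-- ===== PORT B =====
-- B's scan: skip a blank head; otherwise slice off the maximal non-blank run and join it
def segAltGo : List String → List String
  | [] => []
  | head :: tail =>
    if PySem.Str.strip head == "" then segAltGo tail
    else
      let run := head :: tail.takeWhile (fun x => !(PySem.Str.strip x == ""))
      pvJoinStrip (run.map PySem.Str.strip) ::
        segAltGo (tail.dropWhile (fun x => !(PySem.Str.strip x == "")))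
termination_by l => l.length
decreasing_by
  · simp
  · have := List.length_dropWhile_le (fun x => !(PySem.Str.strip x == "")) tail
    simp; omega

def segment_paragraphs_alt (lines : List String) : List String := segAltGo lines

-- ===== PRECONDITION & SPEC =====
def Spec_segment_paragraphs (lines : List String) (out : List String) : Prop := out = segment_paragraphs_alt lines
instance (lines : List String) (out : List String) : Decidable (Spec_segment_paragraphs lines out) := by unfold Spec_segment_paragraphs; infer_instance

-- ===== CLAIM (what is proved, stated in full; the proofs are below) =====
def Claim_equal_segment_paragraphs : Prop := ∀ (lines : List String), Dom_segment_paragraphs lines → Spec_segment_paragraphs lines (segment_paragraphs lines)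

-- ===== LEMMAS AND PROOFS =====

-- the already-flushed paragraphs are only a prefix the loop never revisits
theorem segFinish_foldl_prefix (rest : List String) :
    ∀ paras para, segFinish (rest.foldl segStep (paras, para)) =
      paras ++ segFinish (rest.foldl segStep ([], para)) := by
  induction rest with
  | nil =>
    intro paras para
    simp only [List.foldl, segFinish]
    split_ifs <;> simp
  | cons h t ih =>
    intro paras para
    simp only [List.foldl, segStep]
    by_cases hb : PySem.Str.strip h == ""
    · by_cases hp : para.isEmpty
      · simp only [hb, hp, if_pos]
        exact ih paras para
      · have hp' : para.isEmpty = false := by simpa using hp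
        simp only [hb, hp', if_pos, reduceIte, Bool.false_eq_true, List.nil_append]
        rw [ih (paras ++ [pvJoinStrip para]) [], ih [pvJoinStrip para] []]
        simp
    · have hb' : (PySem.Str.strip h == "") = false := by simpa using hb
      simp only [hb', Bool.false_eq_true, reduceIte]
      exact ih paras (para ++ [PySem.Str.strip h])

-- A's loop, run from pending paragraph `para`, equals B's run-splitting scan
theorem segFinish_foldl_eq (lines : List String) :
    ∀ para, segFinish (lines.foldl segStep ([], para)) =
      if para.isEmpty then segAltGo lines
      else pvJoinStrip (para ++ (lines.takeWhile (fun x => !(PySem.Str.strip x == ""))).map PySem.Str.strip)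
            :: segAltGo (lines.dropWhile (fun x => !(PySem.Str.strip x == ""))) := by
  induction lines with
  | nil =>
    intro para
    simp only [List.foldl, segFinish, List.takeWhile, List.dropWhile, List.map_nil, List.append_nil, segAltGo]
    split_ifs <;> simp
  | cons h t ih =>
    intro para
    simp only [List.foldl, segStep]
    by_cases hb : PySem.Str.strip h == ""
    · have hnb : (fun x => !(PySem.Str.strip x == "")) h = false := by simp [hb]
      by_cases hp : para.isEmpty
      · have hpe : para = [] := List.isEmpty_iff.mp hp
        subst hpe
        simp only [hb, List.isEmpty_nil, reduceIte]
        rw [ih []]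
        simp [segAltGo, hb]
      · have hp' : para.isEmpty = false := by simpa using hp
        simp only [hb, hp', Bool.false_eq_true, reduceIte, if_pos, List.nil_append]
        rw [segFinish_foldl_prefix, ih []]
        simp [segAltGo, hb]
    · have hb' : (PySem.Str.strip h == "") = false := by simpa using hb
      have hnb : (fun x => !(PySem.Str.strip x == "")) h = true := by simp [hb']
      simp only [hb', Bool.false_eq_true, reduceIte]
      rw [ih (para ++ [PySem.Str.strip h])]
      have hne : (para ++ [PySem.Str.strip h]).isEmpty = false := by simp
      by_cases hp : para.isEmpty
      · have hpe : para = [] := List.isEmpty_iff.mp hp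
        subst hpe
        simp [segAltGo, hb']
      · have hp' : para.isEmpty = false := by simpa using hp
        simp [hp', hne, hnb]

-- ===== VERDICT (by name: the statement is the Claim_ definition above) =====
theorem segment_paragraphs_spec : Claim_equal_segment_paragraphs := by
  intro lines _
  unfold Spec_segment_paragraphs segment_paragraphs segment_paragraphs_alt
  rw [segFinish_foldl_eq]
  simp
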